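-- pv_equiv track=rewrite | github.com/indrkl/Secret_TTRPG | TTRPG/utils/stats.py | largest_streak
-- ===== SOURCE A (Python) =====
-- def check_match(dice_rolls, target_dice, target_count, proficiency):
--     proficiency_remaining = proficiency
--     proficiency_threshold = 0
--     used_dice = []
--     remaining_dice = dice_rolls.copy()
--
--     while proficiency_remaining >= proficiency_threshold:
--         rm_indx = []
--         for i in range(len(remaining_dice)):
--             if abs(remaining_dice[i]-target_dice) == proficiency_threshold:
--                 proficiency_remaining -= proficiency_threshold
--                 used_dice.append(remaining_dice[i])
--                 rm_indx.append(i)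
--             if proficiency_remaining < proficiency_threshold:
--                 break
--         proficiency_threshold += 1
--
--         for i in range(len(rm_indx)-1, -1, -1):
--             del(remaining_dice[rm_indx[i]])
--
--     return len(used_dice) >= target_count
--
-- def largest_streak(dice, target_dice, proficiency):
--     largest = 0
--     for i in range(1, len(dice)+1):
--         if check_match(dice, target_dice, i, proficiency):
--             largest = i
--         else:
--             break
--     # print (str([dice, target_dice, proficiency]))
--     return largest
-- ===== SOURCE B (Python) =====
-- def largest_streak(dice, target_dice, proficiency):
--     r = proficiency
--     cnt = 0
--     for t in sorted(abs(d - target_dice) for d in dice):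
--         if r < t:
--             break
--         r -= t
--         cnt += 1
--     return cnt
-- ===== Notes on version B (the rewrite author's own statement) =====
-- stated objective: faster
-- what changed: A re-runs check_match's full threshold-sweep selection (a while loop over proficiency thresholds with an index scan and in-place deletions) once per candidate count; B observes that the selected set is independent of the count and equals a single greedy pass over the dice's distances to the target sorted ascending, so it sorts the distances once and greedily spends proficiency.
import Mathlib
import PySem

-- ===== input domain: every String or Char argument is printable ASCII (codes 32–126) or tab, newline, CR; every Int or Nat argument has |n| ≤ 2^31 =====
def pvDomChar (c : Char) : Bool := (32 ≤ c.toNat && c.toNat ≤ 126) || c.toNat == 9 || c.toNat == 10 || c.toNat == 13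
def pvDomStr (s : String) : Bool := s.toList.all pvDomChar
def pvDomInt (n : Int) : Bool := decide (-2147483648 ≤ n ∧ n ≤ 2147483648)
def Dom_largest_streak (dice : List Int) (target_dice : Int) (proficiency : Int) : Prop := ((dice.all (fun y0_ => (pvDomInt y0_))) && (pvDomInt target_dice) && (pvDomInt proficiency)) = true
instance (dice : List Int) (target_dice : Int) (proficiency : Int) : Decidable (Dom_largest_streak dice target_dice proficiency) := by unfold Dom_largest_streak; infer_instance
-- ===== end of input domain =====

-- B replaces A's repeated threshold-sweep simulations by one greedy passA over the sorted
-- distances |die - target|; objective: faster (a timing run measures the speed-up).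

-- ===== PORT A =====
-- inner `for i in range(len(remaining_dice))` loop of check_match, with its break
-- (fuel = number of indices still to visit, remaining.length - i; it only makes the loop total)
def innerA (remaining : List Int) (target_dice : Int) (thr : Nat) : Nat → Nat → Int →
    List Int → List Nat → Int × List Int × List Nat
  | 0, _, r, used, rm => (r, used, rm)
  | fuel + 1, i, r, used, rm =>
    if h : i < remaining.length then
      if |remaining[i] - target_dice| = (thr : Int) then
        if r - (thr : Int) < (thr : Int) then (r - (thr : Int), used ++ [remaining[i]], rm ++ [i])
        else innerA remaining target_dice thr fuel (i+1) (r - (thr : Int))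
          (used ++ [remaining[i]]) (rm ++ [i])
      else
        if r < (thr : Int) then (r, used, rm)
        else innerA remaining target_dice thr fuel (i+1) r used rm
    else (r, used, rm)

-- outer `while proficiency_remaining >= proficiency_threshold` loop of check_match
-- (fuel bounds the number of passes; (proficiency + 1).toNat always suffices, see whileA_len)
def whileA (target_dice : Int) : Nat → Int → Nat → List Int → List Int → List Int
  | 0, _, _, used, _ => used
  | fuel + 1, r, thr, used, remaining =>
    if (thr : Int) ≤ r then
      let res := innerA remaining target_dice thr remaining.length 0 r used []
      whileA target_dice fuel res.1 (thr + 1) res.2.1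
        (res.2.2.reverse.foldl (fun l j => l.eraseIdx j) remaining)
    else used

def check_match (dice_rolls : List Int) (target_dice : Int) (target_count : Int)
    (proficiency : Int) : Bool :=
  decide (target_count ≤
    ((whileA target_dice (proficiency + 1).toNat proficiency 0 [] dice_rolls).length : Int))

-- `for i in range(1, len(dice)+1)` loop of largest_streak, with its break
-- (fuel = number of candidate counts still to try, dice.length + 1 - i)
def lsLoop (dice : List Int) (target_dice proficiency : Int) : Nat → Nat → Int → Int
  | 0, _, largest => largest
  | fuel + 1, i, largest =>
    if i ≤ dice.length then
      if check_match dice target_dice (i : Int) proficiency then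
        lsLoop dice target_dice proficiency fuel (i+1) (i : Int)
      else largest
    else largest

def largest_streak (dice : List Int) (target_dice : Int) (proficiency : Int) : Int :=
  lsLoop dice target_dice proficiency dice.length 1 0

-- ===== PORT B =====
def altGo : List Int → Int → Int → Int
  | [], _, cnt => cnt
  | t :: ts, r, cnt => if r < t then cnt else altGo ts (r - t) (cnt + 1)

def largest_streak_alt (dice : List Int) (target_dice : Int) (proficiency : Int) : Int :=
  altGo (PySem.List.sorted (dice.map (fun d => |d - target_dice|)) (fun x => x) false)
    proficiency 0

-- ===== PRECONDITION & SPEC =====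
def Spec_largest_streak (dice : List Int) (target_dice : Int) (proficiency : Int) (out : Int) : Prop := out = largest_streak_alt dice target_dice proficiency
instance (dice : List Int) (target_dice : Int) (proficiency : Int) (out : Int) : Decidable (Spec_largest_streak dice target_dice proficiency out) := by unfold Spec_largest_streak; infer_instance

-- ===== CLAIM (what is proved, stated in full; the proofs are below) =====
def Claim_equal_largest_streak : Prop := ∀ (dice : List Int) (target_dice : Int) (proficiency : Int), Dom_largest_streak dice target_dice proficiency → Spec_largest_streak dice target_dice proficiency (largest_streak dice target_dice proficiency)

-- ===== LEMMAS AND PROOFS =====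

-- abstract description of one threshold passA of check_match:
-- r = proficiency left, taken = dice matched this passA, pos = their positions,
-- kept = remaining dice after the passA, broke = the passA hit the break
structure PassRes where
  r : Int
  taken : List Int
  pos : List Nat
  kept : List Int
  broke : Bool

def passA (td : Int) (thr : Nat) : List Int → Int → PassRes
  | [], r => ⟨r, [], [], [], false⟩
  | d :: l, r =>
    if |d - td| = (thr : Int) then
      if r - (thr : Int) < (thr : Int) then ⟨r - (thr : Int), [d], [0], l, true⟩
      else
        let p := passA td thr l (r - (thr : Int))
        ⟨p.r, d :: p.taken, 0 :: p.pos.map (· + 1), p.kept, p.broke⟩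
    else
      let p := passA td thr l r
      ⟨p.r, p.taken, p.pos.map (· + 1), d :: p.kept, p.broke⟩

lemma pass_r_le (td : Int) (thr : Nat) :
    ∀ (l : List Int) (r : Int), (passA td thr l r).r ≤ r := by
  intro l
  induction l with
  | nil => intro r; simp [passA]
  | cons d l ih =>
    intro r
    simp only [passA]
    split
    · split
      · simp
      · exact le_trans (ih _) (by omega)
    · exact ih r

lemma pass_broke (td : Int) (thr : Nat) :
    ∀ (l : List Int) (r : Int), (passA td thr l r).broke = true → (passA td thr l r).r < (thr : Int) := by
  intro l
  induction l with
  | nil => intro r h; simp [passA] at h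
  | cons d l ih =>
    intro r
    simp only [passA]
    split
    · split
      · intro _; simpa using (by assumption : r - (thr : Int) < (thr : Int))
      · exact ih _
    · exact ih r

lemma pass_kept_nobroke (td : Int) (thr : Nat) :
    ∀ (l : List Int) (r : Int), (passA td thr l r).broke = false →
      (passA td thr l r).kept = l.filter (fun d => !(|d - td| == (thr : Int))) := by
  intro l
  induction l with
  | nil => intro r _; simp [passA]
  | cons d l ih =>
    intro r
    simp only [passA]
    split
    · split
      · intro h; simp at h
      · intro h
        simp only [List.filter_cons]
        have : (!(|d - td| == (thr : Int))) = false := by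
          simp; assumption
        rw [this]
        exact ih _ h
    · intro h
      simp only [List.filter_cons]
      have : (!(|d - td| == (thr : Int))) = true := by
        simp; assumption
      rw [this]
      simp [ih r h]

lemma eraseIdx_boundary {α : Type} (pre rest : List α) (d : α) :
    (pre ++ d :: rest).eraseIdx pre.length = pre ++ rest := by
  induction pre with
  | nil => simp
  | cons a t ih => simpa [List.eraseIdx] using ih

lemma innerA_eq_pass (td : Int) (thr : Nat) :
    ∀ (l : List Int) (fuel : Nat) (pre : List Int) (r : Int) (used : List Int) (rm : List Nat),
      l.length ≤ fuel → (thr : Int) ≤ r →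
      innerA (pre ++ l) td thr fuel pre.length r used rm
        = ((passA td thr l r).r, used ++ (passA td thr l r).taken,
           rm ++ (passA td thr l r).pos.map (pre.length + ·)) := by
  intro l
  induction l with
  | nil =>
    intro fuel pre r used rm _ _
    cases fuel with
    | zero => simp [innerA, passA]
    | succ fuel =>
      rw [innerA]
      simp [passA]
  | cons d l ih =>
    intro fuel pre r used rm hf hr
    obtain ⟨fuel, rfl⟩ : ∃ f, fuel = f + 1 := ⟨fuel - 1, by simp at hf; omega⟩
    have hlen : pre.length < (pre ++ d :: l).length := by simp
    have hget : (pre ++ d :: l)[pre.length]'hlen = d := by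
      rw [List.getElem_append_right (by omega)]
      simp
    rw [innerA]
    rw [dif_pos hlen]
    rw [hget]
    by_cases hm : |d - td| = (thr : Int)
    · rw [if_pos hm]
      simp only [passA, if_pos hm]
      by_cases hb : r - (thr : Int) < (thr : Int)
      · simp only [if_pos hb]
        simp
      · simp only [if_neg hb]
        have heq : pre ++ d :: l = (pre ++ [d]) ++ l := by simp
        have hi : pre.length + 1 = (pre ++ [d]).length := by simp
        rw [heq, hi, ih fuel (pre ++ [d]) (r - (thr : Int)) (used ++ [d]) (rm ++ [pre.length]) (by simp at hf ⊢; omega) (by omega)]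
        have hmm : ((fun x => pre.length + x) ∘ fun x => x + 1)
            = (fun x => (pre ++ [d]).length + x) := by
          funext x; simp; omega
        simp [hmm]
    · rw [if_neg hm]
      rw [if_neg (by omega)]
      simp only [passA, if_neg hm]
      have heq : pre ++ d :: l = (pre ++ [d]) ++ l := by simp
      have hi : pre.length + 1 = (pre ++ [d]).length := by simp
      rw [heq, hi, ih fuel (pre ++ [d]) r used rm (by simp at hf ⊢; omega) hr]
      simp only [List.map_map]
      have : ((fun x => pre.length + x) ∘ fun x => x + 1)
          = (fun x => (pre ++ [d]).length + x) := by
        funext x; simp; omega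
      rw [this]

lemma erase_pass (td : Int) (thr : Nat) :
    ∀ (l pre : List Int) (r : Int),
      (((passA td thr l r).pos.map (pre.length + ·)).reverse).foldl
          (fun acc j => acc.eraseIdx j) (pre ++ l)
        = pre ++ (passA td thr l r).kept := by
  intro l
  induction l with
  | nil => intro pre r; simp [passA]
  | cons d l ih =>
    intro pre r
    simp only [passA]
    split
    · split
      · simpa using eraseIdx_boundary pre l d
      · simp only [List.map_cons, List.map_map]
        have hmm : ((fun x => pre.length + x) ∘ fun x => x + 1)
            = (fun x => (pre ++ [d]).length + x) := by
          funext x; simp; omega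
        rw [hmm]
        rw [List.reverse_cons, List.foldl_append]
        have heq : pre ++ d :: l = (pre ++ [d]) ++ l := by simp
        rw [heq, ih (pre ++ [d])]
        simpa using eraseIdx_boundary pre (passA td thr l (r - (thr:Int))).kept d
    · simp only [List.map_map]
      have hmm : ((fun x => pre.length + x) ∘ fun x => x + 1)
          = (fun x => (pre ++ [d]).length + x) := by
        funext x; simp; omega
      rw [hmm]
      have heq : pre ++ d :: l = (pre ++ [d]) ++ l := by simp
      rw [heq, ih (pre ++ [d])]
      simp

lemma altGo_acc : ∀ (s : List Int) (r cnt : Int), altGo s r cnt = cnt + altGo s r 0 := by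
  intro s
  induction s with
  | nil => intro r cnt; simp [altGo]
  | cons t ts ih =>
    intro r cnt
    simp only [altGo]
    split
    · simp
    · rw [ih _ (cnt + 1), ih _ (0 + 1)]; ring

lemma altGo_zero_of_lt : ∀ (s : List Int) (r : Int), (∀ x ∈ s, r < x) → altGo s r 0 = 0 := by
  intro s r h
  cases s with
  | nil => simp [altGo]
  | cons t ts => simp [altGo, h t (by simp)]

lemma altGo_nonneg : ∀ (s : List Int) (r cnt : Int), cnt ≤ altGo s r cnt := by
  intro s
  induction s with
  | nil => intro r cnt; simp [altGo]
  | cons t ts ih =>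
    intro r cnt
    simp only [altGo]
    split
    · simp
    · exact le_trans (by omega) (ih (r - t) (cnt + 1))

lemma altGo_le_length : ∀ (s : List Int) (r cnt : Int), altGo s r cnt ≤ cnt + s.length := by
  intro s
  induction s with
  | nil => intro r cnt; simp [altGo]
  | cons t ts ih =>
    intro r cnt
    simp only [altGo]
    split
    · simp; omega
    · calc altGo ts (r - t) (cnt + 1) ≤ (cnt + 1) + ts.length := ih _ _
        _ ≤ cnt + (t :: ts).length := by simp; omega

lemma pass_greedy (td : Int) (thr : Nat) :
    ∀ (l : List Int) (r : Int) (T : List Int), (thr : Int) ≤ r →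
      (∀ x ∈ T, (thr : Int) ≤ x) →
      altGo (List.replicate ((l.map (fun d => |d - td|)).count (thr : Int)) (thr : Int) ++ T) r 0
        = ((passA td thr l r).taken.length : Int)
          + (if (passA td thr l r).broke then 0 else altGo T (passA td thr l r).r 0) := by
  intro l
  induction l with
  | nil =>
    intro r T hr hT
    simp [passA]
  | cons d l ih =>
    intro r T hr hT
    simp only [List.map_cons, List.count_cons]
    by_cases hm : |d - td| = (thr : Int)
    · rw [if_pos (by simpa using hm)]
      simp only [passA, if_pos hm]
      rw [List.replicate_succ, List.cons_append]
      rw [show altGo ((thr : Int) :: (List.replicate ((l.map (fun d => |d - td|)).count (thr : Int)) (thr : Int) ++ T)) r 0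
            = if r < (thr : Int) then 0
              else altGo (List.replicate ((l.map (fun d => |d - td|)).count (thr : Int)) (thr : Int) ++ T) (r - thr) (0 + 1)
          from rfl]
      rw [if_neg (by omega)]
      rw [altGo_acc]
      by_cases hb : r - (thr : Int) < (thr : Int)
      · rw [if_pos hb]
        have hz : altGo (List.replicate ((l.map (fun d => |d - td|)).count (thr : Int)) (thr : Int) ++ T) (r - thr) 0 = 0 := by
          apply altGo_zero_of_lt
          intro x hx
          rcases List.mem_append.mp hx with hx | hx
          · have := List.eq_of_mem_replicate hx; omega
          · have := hT x hx; omega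
        rw [hz]
        simp
      · rw [if_neg hb]
        rw [ih (r - (thr : Int)) T (by omega) hT]
        simp only [List.length_cons]
        push_cast
        ring
    · rw [if_neg (by simpa using hm)]
      simp only [passA, if_neg hm, Nat.add_zero]
      rw [ih r T hr hT]

lemma split_sorted (thr : Nat) (l : List Int) (h : ∀ x ∈ l, (thr : Int) ≤ x) :
    PySem.List.sorted l (fun x => x) false
      = List.replicate (l.count (thr : Int)) (thr : Int)
        ++ PySem.List.sorted (l.filter (fun x => !(x == (thr : Int)))) (fun x => x) false := by
  apply PySem.List.sorted_id_eq_of_perm_of_pairwise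
  · have h1 : List.replicate (l.count (thr : Int)) (thr : Int) = l.filter (· == (thr : Int)) := by
      rw [List.filter_beq]
    rw [h1]
    exact List.Perm.trans (List.Perm.append_left _ (PySem.List.sorted_perm _ _ _))
      (List.filter_append_perm _ l)
  · rw [List.pairwise_append]
    refine ⟨?_, ?_, ?_⟩
    · rw [List.pairwise_replicate]; right; exact le_refl _
    · exact PySem.List.sorted_pairwise _ _
    · intro a ha b hb
      have ha' := List.eq_of_mem_replicate ha
      have hb' : b ∈ l.filter (fun x => !(x == (thr : Int))) :=
        (PySem.List.mem_sorted _ _ _ _).mp hb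
      rw [List.mem_filter] at hb'
      have := h b hb'.1
      omega

lemma map_filter_comm (l : List Int) (td : Int) (thr : Nat) :
    (l.filter (fun d => !(|d - td| == (thr : Int)))).map (fun d => |d - td|)
      = (l.map (fun d => |d - td|)).filter (fun x => !(x == (thr : Int))) := by
  rw [List.filter_map]
  rfl

lemma whileA_len (td : Int) :
    ∀ (n : Nat) (r : Int) (thr : Nat) (used remaining : List Int),
      (r + 1 - thr).toNat ≤ n →
      (∀ d ∈ remaining, (thr : Int) ≤ |d - td|) →
      ((whileA td n r thr used remaining).length : Int)
        = used.length
          + altGo (PySem.List.sorted (remaining.map (fun d => |d - td|)) (fun x => x) false) r 0 := by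
  intro n
  induction n with
  | zero =>
    intro r thr used remaining hn hinv
    rw [whileA]
    have hz : altGo (PySem.List.sorted (remaining.map (fun d => |d - td|)) (fun x => x) false) r 0 = 0 := by
      apply altGo_zero_of_lt
      intro x hx
      have hx' : x ∈ remaining.map (fun d => |d - td|) := (PySem.List.mem_sorted _ _ _ _).mp hx
      rcases List.mem_map.mp hx' with ⟨d, hd, rfl⟩
      have := hinv d hd
      omega
    rw [hz]; ring
  | succ n ih =>
    intro r thr used remaining hn hinv
    by_cases hr : (thr : Int) ≤ r
    · rw [whileA, if_pos hr]
      simp only []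
      have hbridge := innerA_eq_pass td thr remaining remaining.length [] r used [] (le_refl _) hr
      simp only [List.nil_append, List.length_nil] at hbridge
      rw [hbridge]
      have herase := erase_pass td thr remaining [] r
      simp only [List.nil_append, List.length_nil] at herase
      simp only []
      rw [herase]
      -- the sorted distance list splits into the matched block and the rest
      have hsplit := split_sorted thr (remaining.map (fun d => |d - td|))
        (by intro x hx; rcases List.mem_map.mp hx with ⟨d, hd, rfl⟩; exact hinv d hd)
      have hT : ∀ x ∈ PySem.List.sorted ((remaining.map (fun d => |d - td|)).filter (fun x => !(x == (thr : Int)))) (fun x => x) false, (thr : Int) ≤ x := by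
        intro x hx
        have hx' := (PySem.List.mem_sorted _ _ _ _).mp hx
        rw [List.mem_filter] at hx'
        rcases List.mem_map.mp hx'.1 with ⟨d, hd, rfl⟩
        exact hinv d hd
      have hgreedy := pass_greedy td thr remaining r _ hr hT
      by_cases hb : (passA td thr remaining r).broke = true
      · -- break: the next while test fails and the loop returns
        have hrlt := pass_broke td thr remaining r hb
        have hstop : ∀ (m : Nat) (u rem : List Int), whileA td m (passA td thr remaining r).r (thr + 1) u rem = u := by
          intro m u rem
          cases m with
          | zero => rw [whileA]
          | succ m => rw [whileA, if_neg (by push_cast; omega)]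
        rw [hstop]
        rw [hsplit, hgreedy, if_pos hb]
        simp
      · rw [Bool.not_eq_true] at hb
        have hkept := pass_kept_nobroke td thr remaining r hb
        have hinv' : ∀ d ∈ (passA td thr remaining r).kept, ((thr + 1 : Nat) : Int) ≤ |d - td| := by
          intro d hd
          rw [hkept, List.mem_filter] at hd
          have h1 := hinv d hd.1
          have h2 : ¬(|d - td| = (thr : Int)) := by simpa using hd.2
          push_cast
          omega
        have hle := pass_r_le td thr remaining r
        have hmeas : ((passA td thr remaining r).r + 1 - (thr + 1 : Nat)).toNat ≤ n := by
          push_cast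
          omega
        rw [ih _ _ _ _ hmeas hinv']
        rw [hkept, map_filter_comm]
        rw [hsplit, hgreedy, if_neg (by simp [hb])]
        simp only [List.length_append]
        push_cast
        ring
    · rw [whileA, if_neg hr]
      have hz : altGo (PySem.List.sorted (remaining.map (fun d => |d - td|)) (fun x => x) false) r 0 = 0 := by
        apply altGo_zero_of_lt
        intro x hx
        have hx' : x ∈ remaining.map (fun d => |d - td|) := (PySem.List.mem_sorted _ _ _ _).mp hx
        rcases List.mem_map.mp hx' with ⟨d, hd, rfl⟩
        have := hinv d hd
        omega
      rw [hz]; ring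

lemma check_match_eq (dice : List Int) (td c p : Int) :
    check_match dice td c p = decide (c ≤ largest_streak_alt dice td p) := by
  unfold check_match
  have h := whileA_len td ((p + 1).toNat) p 0 [] dice (by omega)
    (by intro d _; simp)
  simp only [List.length_nil, Int.natCast_zero, zero_add] at h
  rw [h]
  rfl

lemma alt_nonneg (dice : List Int) (td p : Int) : 0 ≤ largest_streak_alt dice td p := by
  unfold largest_streak_alt
  exact altGo_nonneg _ _ 0

lemma alt_le_len (dice : List Int) (td p : Int) :
    largest_streak_alt dice td p ≤ (dice.length : Int) := by
  unfold largest_streak_alt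
  have h := altGo_le_length (PySem.List.sorted (dice.map (fun d => |d - td|)) (fun x => x) false) p 0
  have hl : (PySem.List.sorted (dice.map (fun d => |d - td|)) (fun x => x) false).length = dice.length := by
    rw [PySem.List.length_sorted, List.length_map]
  omega

lemma lsLoop_spec (dice : List Int) (td p : Int) :
    ∀ (k i : Nat) (largest : Int), dice.length + 1 - i ≤ k →
      lsLoop dice td p k i largest
        = if (i : Int) ≤ largest_streak_alt dice td p then largest_streak_alt dice td p else largest := by
  intro k
  induction k with
  | zero =>
    intro i largest hk
    have hi : dice.length < i := by omega
    rw [lsLoop]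
    rw [if_neg (by have := alt_le_len dice td p; omega)]
  | succ k ih =>
    intro i largest hk
    by_cases hi : i ≤ dice.length
    · rw [lsLoop, if_pos hi, check_match_eq]
      by_cases hc : (i : Int) ≤ largest_streak_alt dice td p
      · rw [if_pos (by simpa using hc)]
        rw [ih (i + 1) (i : Int) (by omega)]
        by_cases hc' : ((i + 1 : Nat) : Int) ≤ largest_streak_alt dice td p
        · rw [if_pos hc', if_pos hc]
        · rw [if_neg hc', if_pos hc]
          push_cast at hc'
          omega
      · rw [if_neg (by simpa using hc), if_neg hc]
    · rw [lsLoop, if_neg hi]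
      rw [if_neg (by have := alt_le_len dice td p; omega)]

-- ===== VERDICT (by name: the statement is the Claim_ definition above) =====
theorem largest_streak_spec : Claim_equal_largest_streak := by
  intro dice td p _
  unfold Spec_largest_streak largest_streak
  rw [lsLoop_spec dice td p dice.length 1 0 (by omega)]
  have h0 := alt_nonneg dice td p
  by_cases h1 : (1 : Int) ≤ largest_streak_alt dice td p
  · rw [if_pos (by exact_mod_cast h1)]
  · rw [if_neg (by exact_mod_cast h1)]
    omega
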